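-- pv_equiv track=rewrite | github.com/pdtlong/Transition-Based-Dependency-Parsing | Transition-Based-Dependency-Parsing_demo/main.py | calculate_right_arc
-- ===== SOURCE A (Python) =====
-- def common_arcs(relations,unique_tags,lr_list):
--     arc_dict = {}
--     arc = {}
--     for tag in unique_tags:
--         tag_left_right = []
--         for _, tags_relation in enumerate(relations):
--             if tag in tags_relation:
--                 tag_left_right.append(list(tags_relation[tag][1::2]))
--             else:
--                 tag_left_right.append(['none'])
--         arc_dict[tag] = tag_left_right
--
--     for tag in unique_tags:
--         count = 0
--         temp_dict = {}
--         for sentence in lr_list: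
--             if tag in sentence:
--                 relation = sentence[tag]
--                 for tags in arc_dict:
--                     head = arc_dict[tags]
--                     value = head[count]
--                     for rel in range(len(relation)):
--                         if relation[rel] in value or relation[rel] == value:
--                             if tags in temp_dict:
--                                 temp_dict[tags] = temp_dict[tags] + 1
--                             else:
--                                 temp_dict[tags] = 1
--             count += 1
--         arc[tag] = temp_dict
--     return arc
--
-- def calculate_right_arc(relations,unique_tags):
--     right_list = []
--     for indx, tags_relation in enumerate(relations):
--         dict_right_temp = dict()
--         for tag in tags_relation:
--             head = tags_relation[tag][::2]
--             index = tags_relation[tag][1::2]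
--             for l in range(0,len(head)):
--                 if head[l] < index[l] and head[l]!=0:
--                     dict_right_temp.setdefault(tag, []).append(head[l])
--
--         right_list.append((dict_right_temp))
--     right_arc = common_arcs(relations,unique_tags,right_list)
--     return right_arc
-- ===== SOURCE B (Python) =====
-- def calculate_right_arc(relations, unique_tags):
--     # Sentence-major single pass: per sentence build one inverted index from
--     # dependent-position values to the tags holding them, then count each tag's
--     # right-arc heads by index lookup instead of scanning every tag's slice.
--     uniq = list(dict.fromkeys(unique_tags))
--     arc = {tag: {} for tag in uniq}
--     for sent in relations:
--         idx = {}
--         for t2 in uniq: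
--             if t2 in sent:
--                 for v in dict.fromkeys(sent[t2][1::2]):
--                     idx.setdefault(v, []).append(t2)
--         for tag in uniq:
--             if tag not in sent:
--                 continue
--             vals = sent[tag]
--             rights = [h for h, d in zip(vals[::2], vals[1::2]) if h != 0 and h < d]
--             if not rights:
--                 continue
--             contrib = {}
--             for h in rights:
--                 for t2 in idx.get(h, ()):
--                     contrib[t2] = contrib.get(t2, 0) + 1
--             bucket = arc[tag]
--             for t2 in uniq:
--                 if t2 in contrib:
--                     bucket[t2] = bucket.get(t2, 0) + contrib[t2]
--     return arc
-- ===== Notes on version B (the rewrite author's own statement) =====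
-- stated objective: faster
-- what changed: B is a sentence-major single pass: it pre-initialises the result table and, per sentence, builds one inverted index from dependent-position values to the tags holding them, so each tag's right-arc heads are counted by index lookup (plus an order-preserving merge) instead of A's tag-major re-scan of every other tag's slice for every (tag, sentence) pair; A's three staged passes (right_list, arc_dict table, counting scan with a running counter) disappear.
import Mathlib
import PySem

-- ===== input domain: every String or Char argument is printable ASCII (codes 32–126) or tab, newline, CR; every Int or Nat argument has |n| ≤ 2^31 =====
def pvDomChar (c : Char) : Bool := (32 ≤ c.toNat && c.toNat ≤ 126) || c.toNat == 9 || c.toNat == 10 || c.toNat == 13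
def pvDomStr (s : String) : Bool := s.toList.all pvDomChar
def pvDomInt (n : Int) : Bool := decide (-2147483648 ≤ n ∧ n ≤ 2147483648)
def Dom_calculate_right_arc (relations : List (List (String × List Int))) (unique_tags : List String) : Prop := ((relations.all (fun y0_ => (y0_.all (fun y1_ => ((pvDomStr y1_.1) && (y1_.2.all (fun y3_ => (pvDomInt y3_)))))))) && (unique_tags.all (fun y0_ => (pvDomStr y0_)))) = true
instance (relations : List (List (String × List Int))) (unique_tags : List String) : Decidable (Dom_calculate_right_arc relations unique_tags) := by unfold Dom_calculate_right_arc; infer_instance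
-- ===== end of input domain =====

-- B replaces A's three tag-major passes by one sentence-major pass over a per-sentence inverted
-- index (dependent value -> tags), merged in tag order; objective: faster (measured).


-- shared slice helpers: both Pythons write vals[::2] and vals[1::2]
def pvEvens (xs : List Int) : List Int := (PySem.List.slice? xs none none 2).getD []   -- xs[::2]; step 2 ≠ 0, never none
def pvOdds  (xs : List Int) : List Int := (PySem.List.slice? xs (some 1) none 2).getD []  -- xs[1::2]

-- ===== PORT A =====
-- the body of A's first loop: dict_right_temp for one sentence (a Python dict)
def pvRightTemp (d : PySem.Dict String (List Int)) : PySem.Dict String (List Int) :=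
  d.keys.foldl (fun dt tag =>
    let head := pvEvens (d.getD tag [])
    let index := pvOdds (d.getD tag [])
    (PySem.List.pyRange 0 (head.length : Int) 1).foldl (fun dt l =>
      if PySem.List.pyGetD head l 0 < PySem.List.pyGetD index l 0 ∧ PySem.List.pyGetD head l 0 ≠ 0 then
        dt.modify tag [] (fun xs => xs ++ [PySem.List.pyGetD head l 0])   -- setdefault(tag, []).append(head[l])
      else dt) dt) PySem.Dict.empty

-- Python's test `relation[rel] in value or relation[rel] == value`: value is either a list of ints or
-- the placeholder ['none']; an int is never `in` ['none'] nor == a list, so the placeholder is ported as none.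
def pvMatches (value : Option (List Int)) (r : Int) : Bool :=
  match value with
  | some v => v.contains r
  | none => false

def pvCommonArcs (relations : List (List (String × List Int))) (unique_tags : List String)
    (lr_list : List (PySem.Dict String (List Int))) : PySem.Dict String (PySem.Dict String Int) :=
  let arc_dict : PySem.Dict String (List (Option (List Int))) :=
    unique_tags.foldl (fun ad tag =>
      let tag_left_right := relations.foldl (fun acc s =>
        let tr := PySem.Dict.ofList s
        acc ++ [if tr.contains tag then some (pvOdds (tr.getD tag [])) else none]) []
      ad.insert tag tag_left_right) PySem.Dict.empty
  unique_tags.foldl (fun arc tag =>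
    let st := lr_list.foldl (fun st sentence =>
      let temp_dict := st.1
      let count := st.2
      let temp_dict :=
        if sentence.contains tag then
          let relation := sentence.getD tag []
          arc_dict.keys.foldl (fun temp_dict tags =>
            let head := arc_dict.getD tags []
            let value := PySem.List.pyGetD head count none
            (PySem.List.pyRange 0 (relation.length : Int) 1).foldl (fun temp_dict rel =>
              if pvMatches value (PySem.List.pyGetD relation rel 0) then
                if temp_dict.contains tags then temp_dict.insert tags (temp_dict.getD tags 0 + 1)
                else temp_dict.insert tags 1
              else temp_dict) temp_dict) temp_dict
        else temp_dict
      (temp_dict, count + 1)) ((PySem.Dict.empty : PySem.Dict String Int), (0 : Int))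
    arc.insert tag st.1) PySem.Dict.empty

def calculate_right_arc (relations : List (List (String × List Int))) (unique_tags : List String) : List (String × List (String × Int)) :=
  let right_list := relations.foldl (fun acc s =>
    acc ++ [pvRightTemp (PySem.Dict.ofList s)]) []
  ((pvCommonArcs relations unique_tags right_list).items).map (fun p => (p.1, p.2.items))

-- ===== PORT B =====
-- [h for h, d in zip(vals[::2], vals[1::2]) if h != 0 and h < d]
def pvRights (vals : List Int) : List Int :=
  (((pvEvens vals).zip (pvOdds vals)).filter (fun p => p.1 != 0 && decide (p.1 < p.2))).map (fun p => p.1)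

-- Source B's per-sentence inverted index: dependent-position value -> tags (uniq order) holding it
def pvIdx (uniq : List String) (sent : PySem.Dict String (List Int)) : PySem.Dict Int (List String) :=
  uniq.foldl (fun idx t2 =>
    match sent.get? t2 with
    | none => idx
    | some w => (PySem.List.dedup (pvOdds w)).foldl (fun idx v => idx.modify v [] (fun ts => ts ++ [t2])) idx)
    PySem.Dict.empty

-- Source B's contrib dict: for h in rights: for t2 in idx.get(h, ()): contrib[t2] += 1
def pvContrib (idx : PySem.Dict Int (List String)) (rights : List Int) : PySem.Dict String Int :=
  rights.foldl (fun c h =>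
    (idx.getD h []).foldl (fun c t2 => c.insert t2 (c.getD t2 0 + 1)) c) PySem.Dict.empty

-- Source B's order-preserving merge of contrib into the tag's bucket
def pvMerge (uniq : List String) (contrib : PySem.Dict String Int) (bucket : PySem.Dict String Int) : PySem.Dict String Int :=
  uniq.foldl (fun b t2 =>
    if contrib.contains t2 then b.insert t2 (b.getD t2 0 + contrib.getD t2 0) else b) bucket

def calculate_right_arc_alt (relations : List (List (String × List Int))) (unique_tags : List String) : List (String × List (String × Int)) :=
  let uniq := PySem.List.dedup unique_tags                      -- list(dict.fromkeys(unique_tags))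
  let arc0 := uniq.foldl (fun arc tag => arc.insert tag (PySem.Dict.empty : PySem.Dict String Int)) PySem.Dict.empty  -- {tag: {} for tag in uniq}
  let arc := relations.foldl (fun arc s =>
    let sent := PySem.Dict.ofList s
    let idx := pvIdx uniq sent
    uniq.foldl (fun arc tag =>
      match sent.get? tag with
      | none => arc
      | some vals =>
        let rights := pvRights vals
        if rights = [] then arc
        else arc.insert tag (pvMerge uniq (pvContrib idx rights) (arc.getD tag PySem.Dict.empty))) arc) arc0
  arc.items.map (fun p => (p.1, p.2.items))

-- ===== PRECONDITION & SPEC =====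
-- Pre_ excludes exactly the inputs on which A raises IndexError: a sentence (as the Python dict the
-- association list encodes) whose value list has odd length makes A read index[l] past the end.
def Pre_calculate_right_arc (relations : List (List (String × List Int))) (unique_tags : List String) : Prop :=
  ∀ s ∈ relations, ∀ v ∈ (PySem.Dict.ofList s).values, v.length % 2 = 0
instance (relations : List (List (String × List Int))) (unique_tags : List String) : Decidable (Pre_calculate_right_arc relations unique_tags) := by unfold Pre_calculate_right_arc; infer_instance

def pvWitness_calculate_right_arc : (List (List (String × List Int))) × List String :=
  ([[("a", [1, 2, 2, 3]), ("b", [0, 1])]], ["a", "b"])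

def Spec_calculate_right_arc (relations : List (List (String × List Int))) (unique_tags : List String) (out : List (String × List (String × Int))) : Prop := out = calculate_right_arc_alt relations unique_tags
instance (relations : List (List (String × List Int))) (unique_tags : List String) (out : List (String × List (String × Int))) : Decidable (Spec_calculate_right_arc relations unique_tags out) := by unfold Spec_calculate_right_arc; infer_instance

-- ===== CLAIM (what is proved, stated in full; the proofs are below) =====
def Claim_equal_calculate_right_arc : Prop := ∀ (relations : List (List (String × List Int))) (unique_tags : List String), Dom_calculate_right_arc relations unique_tags → Pre_calculate_right_arc relations unique_tags → Spec_calculate_right_arc relations unique_tags (calculate_right_arc relations unique_tags)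

-- ===== LEMMAS AND PROOFS =====

-- canonical per-tag, per-sentence counting step both programs reduce to
def pvRightsOf (d : PySem.Dict String (List Int)) (tag : String) : List Int :=
  match d.get? tag with
  | none => []
  | some vals => pvRights vals

def pvStepC (uniq : List String) (sent : PySem.Dict String (List Int)) (tag : String)
    (temp : PySem.Dict String Int) : PySem.Dict String Int :=
  if pvRightsOf sent tag = [] then temp
  else uniq.foldl (fun temp t2 =>
    if sent.contains t2 = true then
      (if (pvRightsOf sent tag).countP (fun h => decide (h ∈ pvOdds (sent.getD t2 []))) = 0 then temp
       else temp.insert t2 (temp.getD t2 0 + ((pvRightsOf sent tag).countP (fun h => decide (h ∈ pvOdds (sent.getD t2 []))) : Int)))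
    else temp) temp

-- a dict built by inserting a key-determined value for each element of l
def pvDmk {ν : Type} (F : String → ν) (l : List String) : PySem.Dict String ν :=
  PySem.Dict.mk ((PySem.List.dedup l).map (fun t => (t, F t)))

lemma pvDmk_contains {ν : Type} (F : String → ν) (ks : List String) (x : String) :
    (pvDmk F ks).contains x = decide (x ∈ ks) := by
  simp only [pvDmk, PySem.Dict.contains, List.any_map, Function.comp_def, PySem.List.dedup]
  rw [Bool.eq_iff_iff]
  simp only [List.any_eq_true, beq_iff_eq, decide_eq_true_eq]
  constructor
  · rintro ⟨a, ha, rfl⟩; exact (PySem.Set.mem_ofList ks a).1 ha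
  · intro h; exact ⟨x, (PySem.Set.mem_ofList ks x).2 h, rfl⟩

-- xs[::2] / xs[1::2] as explicit filterMaps over indices
lemma pvEvens_char (xs : List Int) :
    pvEvens xs = List.filterMap (fun k => xs[2*k]?) (List.range ((xs.length+1)/2)) := by
  simp only [pvEvens, PySem.List.slice?, PySem.List.sliceIndices]
  norm_num
  have h1 : (if 0 < xs.length then ((((xs.length : Int)) + 2 - 1) / 2).toNat else 0) = (xs.length+1)/2 := by
    split <;> omega
  rw [h1]
  exact List.filterMap_congr (fun k _ => by congr 1)

lemma pvOdds_char (xs : List Int) :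
    pvOdds xs = List.filterMap (fun k => xs[1+2*k]?) (List.range (xs.length/2)) := by
  simp only [PySem.List.slice?, PySem.List.sliceIndices, pvOdds]
  norm_num
  match xs with
  | [] => simp
  | x :: t =>
    have hmin : min 1 (((x::t).length : Int)) = 1 := by simp
    simp only [hmin]
    have h1 : (if 1 < (x::t).length then ((((x::t).length : Int) - 1 + 2 - 1) / 2).toNat else 0) = (x::t).length/2 := by
      split <;> omega
    rw [h1]
    exact List.filterMap_congr (fun k _ => by rw [show ((1 : Int)+2*(k : Int)).toNat = 1+2*k by omega])

lemma pvEvens_cons (x : Int) (xs : List Int) : pvEvens (x :: xs) = x :: pvOdds xs := by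
  rw [pvEvens_char, pvOdds_char]
  have hlen : ((x :: xs).length + 1) / 2 = xs.length / 2 + 1 := by simp; omega
  rw [hlen, List.range_succ_eq_map, List.filterMap_cons, List.filterMap_map]
  simp only [Nat.mul_zero, List.getElem?_cons_zero]
  refine congrArg (x :: ·) ?_
  exact List.filterMap_congr (fun k _ => by
    simp only [Function.comp_def, Nat.succ_eq_add_one]
    rw [show 2*(k+1) = 1+2*k+1 by omega]
    (try simp))

lemma pvOdds_cons (x : Int) (xs : List Int) : pvOdds (x :: xs) = pvEvens xs := by
  rw [pvOdds_char, pvEvens_char]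
  have hlen : (x :: xs).length / 2 = (xs.length + 1) / 2 := by simp
  rw [hlen]
  exact List.filterMap_congr (fun k _ => by
    rw [show 1+2*k = 2*k+1 by omega]
    (try simp))

lemma pvList_two_ind {motive : List Int → Prop} (h0 : motive []) (h1 : ∀ x, motive [x])
    (h2 : ∀ x y t, motive t → motive (x :: y :: t)) : ∀ xs, motive xs
  | [] => h0
  | [x] => h1 x
  | x :: y :: t => h2 x y t (pvList_two_ind h0 h1 h2 t)

lemma pvEvens_odds_length (xs : List Int) (h : xs.length % 2 = 0) :
    (pvEvens xs).length = (pvOdds xs).length := by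
  induction xs using pvList_two_ind with
  | h0 => rfl
  | h1 x => simp at h
  | h2 x y t ih =>
    rw [pvEvens_cons, pvOdds_cons, pvOdds_cons, pvEvens_cons]
    simp only [List.length_cons]
    exact congrArg (· + 1) (ih (by simp at h ⊢; omega))

-- a fold threading a counter, read back as a fold over enumerate
lemma pvFoldl_counter_fst {α δ : Type} (f : δ × Int → α → δ) :
    ∀ (xs : List α) (t0 : δ) (c0 : Int),
      (xs.foldl (fun st y => (f st y, st.2 + 1)) (t0, c0)).1
        = (PySem.List.enumerate xs c0).foldl (fun t p => f (t, p.1) p.2) t0 := by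
  intro xs
  induction xs with
  | nil => intro t0 c0; simp [PySem.List.enumerate]
  | cons x xs ih =>
    intro t0 c0
    rw [PySem.List.enumerate_cons]
    simpa using ih (f (t0, c0) x) (c0 + 1)

lemma pvEnumerate_map {α β : Type} (g : α → β) :
    ∀ (xs : List α) (c : Int),
      PySem.List.enumerate (xs.map g) c = (PySem.List.enumerate xs c).map (fun p => (p.1, g p.2)) := by
  intro xs
  induction xs with
  | nil => intro c; simp [PySem.List.enumerate]
  | cons x xs ih => intro c; simp [PySem.List.enumerate_cons, ih]

lemma pvMem_enumerate {α : Type} :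
    ∀ (xs : List α) (c : Int) (p : Int × α), p ∈ PySem.List.enumerate xs c →
      ∃ k : Nat, ∃ hk : k < xs.length, p.1 = c + k ∧ p.2 = xs[k] := by
  intro xs
  induction xs with
  | nil => intro c p hp; simp [PySem.List.enumerate] at hp
  | cons x xs ih =>
    intro c p hp
    rw [PySem.List.enumerate_cons] at hp
    rcases List.mem_cons.1 hp with h | h
    · exact ⟨0, by simp, by simp [h]⟩
    · obtain ⟨k, hk, h1, h2⟩ := ih (c + 1) p h
      exact ⟨k + 1, by simpa using hk, by omega, by simpa using h2⟩

lemma pvFoldl_enum_snd {α δ : Type} (g : δ → α → δ) (xs : List α) (c : Int) (init : δ) :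
    (PySem.List.enumerate xs c).foldl (fun t p => g t p.2) init = xs.foldl g init := by
  conv_rhs => rw [← PySem.List.map_snd_enumerate xs c]
  rw [List.foldl_map]

lemma pvFoldl_id {α δ : Type} (xs : List α) (a : δ) : xs.foldl (fun a _ => a) a = a := by
  induction xs with
  | nil => rfl
  | cons x xs ih => simpa using ih

-- Set.add-chain over a list whose new part is disjoint and nodup just appends
lemma pvSet_update_nodup {α : Type} [BEq α] [LawfulBEq α] :
    ∀ (l s : List α), (s ++ l).Nodup → List.foldl PySem.Set.add s l = s ++ l := by
  intro l
  induction l with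
  | nil => intro s _; simp
  | cons x t ih =>
    intro s hnd
    have hx : x ∉ s := by
      intro hmem
      exact (List.disjoint_of_nodup_append hnd) hmem (by simp)
    have : PySem.Set.add s x = s ++ [x] := by simpa [PySem.Set.add] using hx
    rw [List.foldl_cons, this]
    have : (s ++ [x]) ++ t = s ++ x :: t := by simp
    rw [ih (s ++ [x]) (by simpa using hnd), this]

lemma pvDedup_idem (l : List String) : PySem.List.dedup (PySem.List.dedup l) = PySem.List.dedup l := by
  have h : (([] : List String) ++ PySem.List.dedup l).Nodup := by
    simpa using PySem.Set.nodup_ofList (α := String) l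
  simpa [PySem.List.dedup, PySem.Set.ofList, PySem.Set.empty] using
    pvSet_update_nodup (PySem.List.dedup l) [] h

lemma pvSet_ofList_append_singleton {α : Type} [BEq α] [LawfulBEq α] (l : List α) (x : α) :
    PySem.Set.ofList (l ++ [x])
      = if x ∈ l then PySem.Set.ofList l else PySem.Set.ofList l ++ [x] := by
  have : PySem.Set.ofList (l ++ [x]) = PySem.Set.add (PySem.Set.ofList l) x := by
    simp [PySem.Set.ofList, List.foldl_append]
  rw [this, PySem.Set.add]
  have hc : PySem.Set.contains (PySem.Set.ofList l) x = decide (x ∈ l) := by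
    simp only [PySem.Set.contains, List.contains_iff_mem]
    simp [PySem.Set.mem_ofList]
  rw [hc]
  by_cases hx : x ∈ l <;> simp [hx]

-- inserting with x already a key rewrites the key-function in place
lemma pvDmk_insert {ν : Type} (G : String → ν) (ks : List String) (x : String) (hx : x ∈ ks) (v : ν) :
    (pvDmk G ks).insert x v = pvDmk (fun s => if s = x then v else G s) ks := by
  have hc : (pvDmk G ks).contains x = true := by
    rw [pvDmk_contains]; simpa using hx
  rw [PySem.Dict.insert]
  simp only [hc, if_pos]
  unfold pvDmk
  congr 1
  rw [List.map_map]
  apply List.map_congr_left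
  intro a _
  by_cases hax : a = x <;> simp [hax]

-- inserting a key-determined value for each list element builds pvDmk
lemma pvFoldl_insert_keyfun {ν : Type} (F : String → ν) :
    ∀ (l ks : List String),
      l.foldl (fun d t => d.insert t (F t)) (pvDmk F ks) = pvDmk F (ks ++ l) := by
  intro l
  induction l with
  | nil => intro ks; simp
  | cons x t ih =>
    intro ks
    rw [List.foldl_cons]
    have hstep : (pvDmk F ks).insert x (F x) = pvDmk F (ks ++ [x]) := by
      have hded : PySem.List.dedup (ks ++ [x])
          = if x ∈ ks then PySem.List.dedup ks else PySem.List.dedup ks ++ [x] := by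
        simp only [PySem.List.dedup]
        exact pvSet_ofList_append_singleton ks x
      by_cases hx : x ∈ ks
      · rw [pvDmk_insert F ks x hx (F x)]
        unfold pvDmk
        rw [hded, if_pos hx]
        congr 1
        apply List.map_congr_left
        intro a _
        by_cases hax : a = x <;> simp [hax]
      · have hc : (pvDmk F ks).contains x = false := by
          rw [pvDmk_contains]; simpa using hx
        rw [PySem.Dict.insert]
        simp only [hc]
        unfold pvDmk
        rw [hded, if_neg hx]
        simp
    rw [hstep, ih (ks ++ [x])]
    simp

lemma pvFoldl_insert_keyfun' {ν : Type} (F : String → ν) (l : List String) :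
    l.foldl (fun d t => d.insert t (F t)) PySem.Dict.empty = pvDmk F l := by
  have h := pvFoldl_insert_keyfun F l []
  simpa [pvDmk, PySem.List.dedup, PySem.Set.ofList, PySem.Set.empty, PySem.Dict.empty] using h

lemma pvDmk_congr {ν : Type} (F G : String → ν) (ks : List String)
    (h : ∀ t ∈ PySem.List.dedup ks, F t = G t) : pvDmk F ks = pvDmk G ks := by
  unfold pvDmk
  congr 1
  exact List.map_congr_left (fun t ht => by rw [h t ht])

lemma pvDmk_keys {ν : Type} (F : String → ν) (l : List String) :
    (pvDmk F l).keys = PySem.List.dedup l := by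
  simp [pvDmk, PySem.Dict.keys, List.map_map, Function.comp_def]

lemma pvDmk_nodup_keys {ν : Type} (F : String → ν) (l : List String) :
    (pvDmk F l).keys.Nodup := by
  rw [pvDmk_keys]
  exact PySem.Set.nodup_ofList l

lemma pvDmk_getD {ν : Type} (F : String → ν) (l : List String) {t : String}
    (ht : t ∈ PySem.List.dedup l) (d0 : ν) : (pvDmk F l).getD t d0 = F t := by
  apply PySem.Dict.getD_of_mem_items (d := pvDmk F l) _ (pvDmk_nodup_keys F l)
  exact List.mem_map.2 ⟨t, ht, rfl⟩

lemma pvDmk_map_items_eq {F G : String → PySem.Dict String Int} (l : List String)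
    (h : ∀ tag, F tag = G tag) :
    List.map (fun p => (p.1, p.2.items)) (pvDmk F l).items
      = List.map (fun p => (p.1, p.2.items)) (pvDmk G (PySem.List.dedup l)).items := by
  simp only [pvDmk, pvDedup_idem, List.map_map]
  apply List.map_congr_left
  intro tag _
  simp only [Function.comp_def, h tag]

-- the big counting loop for one fixed inner tag collapses to a single conditional insert
lemma pvCount_fold (v : List Int) (t2 : String) :
    ∀ (rel : List Int) (temp : PySem.Dict String Int),
      rel.foldl (fun temp r =>
        if pvMatches (some v) r then
          (if temp.contains t2 then temp.insert t2 (temp.getD t2 0 + 1) else temp.insert t2 1)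
        else temp) temp
      = (if rel.countP (fun r => v.contains r) = 0 then temp
         else temp.insert t2 (temp.getD t2 0 + (rel.countP (fun r => v.contains r) : Int))) := by
  intro rel
  induction rel with
  | nil => intro temp; simp
  | cons r rel ih =>
    intro temp
    rw [List.foldl_cons, List.countP_cons]
    by_cases hr : v.contains r
    · have hm : pvMatches (some v) r = true := by simpa [pvMatches] using hr
      rw [if_pos hm]
      have hins : (if temp.contains t2 then temp.insert t2 (temp.getD t2 0 + 1) else temp.insert t2 1)
          = temp.insert t2 (temp.getD t2 0 + 1) := by
        by_cases hc : temp.contains t2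
        · rw [if_pos hc]
        · rw [if_neg hc, PySem.Dict.getD_of_not_contains temp 0 (by simpa using hc)]
          norm_num
      rw [hins, ih]
      have hne : ¬(List.countP (fun r => v.contains r) rel + (if v.contains r = true then 1 else 0) = 0) := by
        rw [if_pos hr]
        omega
      rw [if_neg hne]
      by_cases h0 : List.countP (fun r => v.contains r) rel = 0
      · rw [if_pos h0]
        congr 1
        rw [h0, if_pos hr]
        norm_num
      · rw [if_neg h0, PySem.Dict.getD_insert_self, PySem.Dict.insert_insert_self]
        congr 1
        rw [if_pos hr]
        push_cast
        ring
    · have hm : pvMatches (some v) r = false := by simpa [pvMatches] using hr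
      rw [if_neg (by simp [hm]), ih, if_neg hr, Nat.add_zero]

-- pvRightTemp of a dict with nodup keys and even-length values, characterised

lemma pvFoldl_range_getD {δ : Type} (g : δ → Int → Int → δ) :
    ∀ (head index : List Int), head.length = index.length → ∀ (init : δ),
      (List.range head.length).foldl (fun acc k => g acc (head.getD k 0) (index.getD k 0)) init
        = (head.zip index).foldl (fun acc p => g acc p.1 p.2) init := by
  intro head
  induction head with
  | nil => intro index h init; simp
  | cons h hs ih =>
    intro index hlen init
    match index with
    | [] => simp at hlen
    | i :: is =>
      rw [List.length_cons, List.range_succ_eq_map, List.foldl_cons, List.foldl_map]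
      simp only [List.getD_cons_zero, List.getD_cons_succ]
      rw [List.zip_cons_cons, List.foldl_cons]
      exact ih is (by simpa using hlen) (g init h i)

lemma pvFoldl_range_zip {δ : Type} (g : δ → Int → Int → δ)
    (head index : List Int) (h : head.length = index.length) (init : δ) :
    (PySem.List.pyRange 0 (head.length : Int) 1).foldl
      (fun acc l => g acc (PySem.List.pyGetD head l 0) (PySem.List.pyGetD index l 0)) init
    = (head.zip index).foldl (fun acc p => g acc p.1 p.2) init := by
  rw [PySem.List.pyRange_zero, List.foldl_map]
  simp only [PySem.List.pyGetD_natCast, Int.toNat_natCast]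
  exact pvFoldl_range_getD g head index h init

lemma pvRightTemp_flat (d : PySem.Dict String (List Int)) (hnd : d.keys.Nodup)
    (hev : ∀ v ∈ d.values, v.length % 2 = 0) :
    pvRightTemp d = (d.keys.flatMap (fun t => (pvRights (d.getD t [])).map (fun h => (t, h)))).foldl
      (fun dt q => dt.modify q.1 [] (fun xs => xs ++ [q.2])) PySem.Dict.empty := by
  rw [List.foldl_flatMap]
  unfold pvRightTemp
  apply PySem.List.foldl_congr_mem
  intro dt tag htag
  simp only []
  have hv : (d.getD tag []).length % 2 = 0 := by
    obtain ⟨p, hp, hfst⟩ := List.mem_map.1 htag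
    have hgd : d.getD tag [] = p.2 := by
      have : (tag, p.2) ∈ d.items := by
        rw [← hfst]
        simpa using hp
      exact PySem.Dict.getD_of_mem_items d this hnd []
    rw [hgd]
    exact hev p.2 (List.mem_map.2 ⟨p, hp, rfl⟩)
  have hlen := pvEvens_odds_length _ hv
  rw [pvFoldl_range_zip (fun dt h i => if h < i ∧ h ≠ 0 then dt.modify tag [] (fun xs => xs ++ [h]) else dt)
        (pvEvens (d.getD tag [])) (pvOdds (d.getD tag [])) hlen dt]
  have h2 : (fun (dt : PySem.Dict String (List Int)) (p : Int × Int) =>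
        if p.1 < p.2 ∧ p.1 ≠ 0 then dt.modify tag [] (fun xs => xs ++ [p.1]) else dt)
      = (fun dt p => if (p.1 != 0 && decide (p.1 < p.2)) = true then dt.modify tag [] (fun xs => xs ++ [p.1]) else dt) := by
    funext dt p
    by_cases hc : p.1 < p.2 ∧ p.1 ≠ 0
    · rw [if_pos hc, if_pos (by simp [hc.1, hc.2])]
    · rw [if_neg hc, if_neg (by rw [Bool.and_comm]; simpa using hc)]
  rw [h2, ← List.foldl_filter, pvRights, List.foldl_map, List.foldl_map]

lemma pvGet?_of_mem_keys (d : PySem.Dict String (List Int)) (hnd : d.keys.Nodup)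
    {tag : String} (h : tag ∈ d.keys) : d.get? tag = some (d.getD tag []) := by
  obtain ⟨p, hp, hfst⟩ := List.mem_map.1 h
  have hitem : (tag, p.2) ∈ d.items := by rw [← hfst]; simpa using hp
  have hg := PySem.Dict.get?_of_mem_items (d := d) hitem hnd
  rw [hg, PySem.Dict.getD_of_mem_items (d := d) hitem hnd []]

lemma pvRightsOf_eq (d : PySem.Dict String (List Int)) (hnd : d.keys.Nodup) (tag : String) :
    pvRightsOf d tag = if tag ∈ d.keys then pvRights (d.getD tag []) else [] := by
  by_cases h : tag ∈ d.keys
  · rw [if_pos h, pvRightsOf, pvGet?_of_mem_keys d hnd h]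
  · rw [if_neg h, pvRightsOf, (PySem.Dict.get?_eq_none_iff_not_mem_keys d tag).2 h]

lemma pvFlat_pick (R : String → List Int) :
    ∀ (ks : List String), ks.Nodup → ∀ tag,
      (((ks.flatMap (fun t => (R t).map (fun h => (t, h)))).filter (fun q => q.1 == tag)).map (fun q => q.2))
        = if tag ∈ ks then R tag else [] := by
  intro ks
  induction ks with
  | nil => intro _ tag; simp
  | cons k ks ih =>
    intro hnd tag
    rw [List.flatMap_cons, List.filter_append, List.map_append, ih (by simp_all) tag]
    by_cases hk : k = tag
    · subst hk
      have hnotin : k ∉ ks := by simp_all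
      rw [if_neg hnotin, if_pos (by simp)]
      have hfil : ((R k).map (fun h => (k, h))).filter (fun q => q.1 == k) = (R k).map (fun h => (k, h)) := by
        apply List.filter_eq_self.2
        intro q hq
        obtain ⟨h, _, rfl⟩ := List.mem_map.1 hq
        simp
      rw [hfil, List.map_map]
      simp
    · have : ((R k).map (fun h => (k, h))).filter (fun q => q.1 == tag) = [] := by
        apply List.filter_eq_nil_iff.2
        intro q hq
        obtain ⟨h, _, rfl⟩ := List.mem_map.1 hq
        simpa using hk
      rw [this]
      simp only [List.map_nil, List.nil_append, List.mem_cons]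
      by_cases ht : tag ∈ ks
      · rw [if_pos ht, if_pos (Or.inr ht)]
      · rw [if_neg ht, if_neg (by rintro (h | h); exact hk h.symm; exact ht h)]

lemma pvFlat_mem_fst (R : String → List Int) (ks : List String) (tag : String) :
    tag ∈ (ks.flatMap (fun t => (R t).map (fun h => (t, h)))).map (fun q => q.1)
      ↔ tag ∈ ks ∧ R tag ≠ [] := by
  simp only [List.mem_map, List.mem_flatMap]
  constructor
  · rintro ⟨q, ⟨t, ht, hq⟩, rfl⟩
    obtain ⟨h, hh, rfl⟩ := hq
    exact ⟨ht, by intro he; rw [he] at hh; simp at hh⟩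
  · rintro ⟨ht, hne⟩
    obtain ⟨h, hh⟩ := List.exists_mem_of_ne_nil _ hne
    exact ⟨(tag, h), ⟨tag, ht, ⟨h, hh, rfl⟩⟩, rfl⟩

lemma pvRightTemp_getD (d : PySem.Dict String (List Int)) (hnd : d.keys.Nodup)
    (hev : ∀ v ∈ d.values, v.length % 2 = 0) (tag : String) :
    (pvRightTemp d).getD tag [] = pvRightsOf d tag := by
  rw [pvRightTemp_flat d hnd hev, PySem.Dict.getD_foldl_modify_append, PySem.Dict.getD_empty,
    List.nil_append, pvFlat_pick _ d.keys hnd tag, pvRightsOf_eq d hnd tag]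

lemma pvRightTemp_contains (d : PySem.Dict String (List Int)) (hnd : d.keys.Nodup)
    (hev : ∀ v ∈ d.values, v.length % 2 = 0) (tag : String) :
    (pvRightTemp d).contains tag = !(pvRightsOf d tag).isEmpty := by
  rw [pvRightTemp_flat d hnd hev]
  rw [Bool.eq_iff_iff, PySem.Dict.contains_iff_mem_keys]
  rw [PySem.Dict.keys_foldl_modify_key _ Prod.fst [] (fun _ q => fun xs => xs ++ [q.2]) PySem.Dict.empty]
  have hkeys : (PySem.Dict.empty : PySem.Dict String (List Int)).keys = [] := rfl
  rw [hkeys]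
  have hupd : ∀ (l : List String), PySem.Set.update ([] : List String) l = PySem.Set.ofList l := fun _ => rfl
  rw [hupd, PySem.Set.mem_ofList]
  have hmap : List.map Prod.fst (d.keys.flatMap (fun t => (pvRights (d.getD t [])).map (fun h => (t, h))))
      = (d.keys.flatMap (fun t => (pvRights (d.getD t [])).map (fun h => (t, h)))).map (fun q => q.1) := rfl
  rw [hmap, pvFlat_mem_fst]
  rw [pvRightsOf_eq d hnd tag]
  by_cases h : tag ∈ d.keys
  · simp [h]
  · simp [h]

-- ===== B-side lemmas =====

-- the pair list the inverted index is a grouping of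
def pvPairs (uniq : List String) (sent : PySem.Dict String (List Int)) : List (Int × String) :=
  uniq.flatMap (fun t2 =>
    match sent.get? t2 with
    | none => []
    | some w => (PySem.List.dedup (pvOdds w)).map (fun v => (v, t2)))

lemma pvIdx_eq_pairs (uniq : List String) (sent : PySem.Dict String (List Int)) :
    pvIdx uniq sent = (pvPairs uniq sent).foldl
      (fun idx q => idx.modify q.1 [] (fun ts => ts ++ [q.2])) PySem.Dict.empty := by
  unfold pvPairs
  rw [List.foldl_flatMap]
  unfold pvIdx
  apply PySem.List.foldl_congr_mem
  intro idx t2 _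
  cases hg : sent.get? t2 with
  | none => simp [hg]
  | some w => simp [hg, List.foldl_map]

lemma pvIdx_getD (uniq : List String) (sent : PySem.Dict String (List Int)) (h : Int) :
    (pvIdx uniq sent).getD h []
      = ((pvPairs uniq sent).filter (fun q => q.1 == h)).map (fun q => q.2) := by
  rw [pvIdx_eq_pairs, PySem.Dict.getD_foldl_modify_append, PySem.Dict.getD_empty, List.nil_append]

lemma pvIdx_mem (uniq : List String) (sent : PySem.Dict String (List Int)) (h : Int) (t2 : String) :
    t2 ∈ (pvIdx uniq sent).getD h []
      ↔ t2 ∈ uniq ∧ ∃ w, sent.get? t2 = some w ∧ h ∈ pvOdds w := by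
  rw [pvIdx_getD]
  simp only [List.mem_map, List.mem_filter, List.mem_flatMap, beq_iff_eq, pvPairs]
  constructor
  · rintro ⟨q, ⟨⟨t, ht, hq⟩, hk⟩, rfl⟩
    cases hg : sent.get? t with
    | none => rw [hg] at hq; simp at hq
    | some w =>
      rw [hg] at hq
      obtain ⟨v, hv, rfl⟩ := List.mem_map.1 hq
      exact ⟨ht, w, hg, by rw [← hk]; exact (PySem.List.mem_dedup _ _).1 hv⟩
  · rintro ⟨ht2, w, hg, hh⟩
    exact ⟨(h, t2), ⟨⟨t2, ht2, by rw [hg]; exact List.mem_map.2 ⟨h, (PySem.List.mem_dedup _ _).2 hh, rfl⟩⟩, rfl⟩, rfl⟩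

-- pushing filter and map through flatMap
lemma pvFilter_flatMap {α β : Type} (l : List α) (f : α → List β) (p : β → Bool) :
    (l.flatMap f).filter p = l.flatMap (fun x => (f x).filter p) := by
  induction l with
  | nil => rfl
  | cons x t ih => rw [List.flatMap_cons, List.filter_append, ih, List.flatMap_cons]

-- a nodup list filtered down to one value
lemma pvFilter_beq_nodup {α : Type} [DecidableEq α] (h : α) :
    ∀ (l : List α), l.Nodup → l.filter (fun v => v == h) = if h ∈ l then [h] else [] := by
  intro l
  induction l with
  | nil => intro _; simp
  | cons a t ih =>
    intro hnd
    rw [List.filter_cons]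
    by_cases ha : a = h
    · subst ha
      have hnt : a ∉ t := by simp_all
      have ht : t.filter (fun v => v == a) = [] := by
        rw [ih hnd.of_cons, if_neg hnt]
      simp [ht]
    · have : (a == h) = false := by simpa using ha
      rw [this, if_neg, ih hnd.of_cons]
      · simp only [List.mem_cons]
        by_cases hmem : h ∈ t
        · rw [if_pos hmem, if_pos (Or.inr hmem)]
        · rw [if_neg hmem, if_neg (by rintro (he | he); exact ha he.symm; exact hmem he)]
      · simp

-- a flatMap of singletons-or-nil over a nodup list is nodup
lemma pvFlatMap_singleton_nodup {α : Type} (f : α → List α) :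
    ∀ (l : List α), l.Nodup → (∀ t, f t = [] ∨ f t = [t]) → (l.flatMap f).Nodup := by
  intro l
  induction l with
  | nil => intro _ _; simp
  | cons x t ih =>
    intro hnd hf
    rw [List.flatMap_cons]
    apply List.Nodup.append
    · rcases hf x with h | h <;> simp [h]
    · exact ih hnd.of_cons hf
    · intro a ha hb
      have hax : a = x := by rcases hf x with h | h <;> simp [h] at ha; exact ha
      obtain ⟨t', ht', ha'⟩ := List.mem_flatMap.1 hb
      have : a = t' := by rcases hf t' with h | h <;> simp [h] at ha'; exact ha'
      subst hax; subst this
      exact (by simp_all : a ∉ t) ht'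

lemma pvIdx_getD_nodup (uniq : List String) (sent : PySem.Dict String (List Int)) (h : Int)
    (hu : uniq.Nodup) : ((pvIdx uniq sent).getD h []).Nodup := by
  rw [pvIdx_getD]
  unfold pvPairs
  rw [pvFilter_flatMap, List.map_flatMap]
  apply pvFlatMap_singleton_nodup _ uniq hu
  intro t2
  cases hg : sent.get? t2 with
  | none => left; simp [hg]
  | some w =>
    simp only [hg]
    rw [List.filter_map]
    have : ((PySem.List.dedup (pvOdds w)).filter ((fun q => q.1 == h) ∘ (fun v => (v, t2))))
        = (PySem.List.dedup (pvOdds w)).filter (fun v => v == h) := by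
      apply List.filter_congr
      intro v _
      simp [Function.comp_def]
    rw [this, pvFilter_beq_nodup h _ (PySem.List.nodup_dedup _)]
    by_cases hm : h ∈ PySem.List.dedup (pvOdds w)
    · right
      rw [if_pos hm]
      rfl
    · left
      rw [if_neg hm]
      rfl

-- contrib's value at t2: one unit per (h, occurrence of t2 in idx[h])
lemma pvContrib_getD_aux (idx : PySem.Dict Int (List String)) (t2 : String) :
    ∀ (rights : List Int) (c : PySem.Dict String Int),
      (rights.foldl (fun c h => (idx.getD h []).foldl (fun c t2 => c.insert t2 (c.getD t2 0 + 1)) c) c).getD t2 0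
        = c.getD t2 0 + ((rights.map (fun h => (((idx.getD h []).count t2 : Nat) : Int))).sum) := by
  intro rights
  induction rights with
  | nil => intro c; simp
  | cons h t ih =>
    intro c
    rw [List.foldl_cons, ih, PySem.Dict.getD_foldl_insert_add_one]
    simp only [List.map_cons, List.sum_cons]
    ring

lemma pvCount_if_mem {α : Type} [DecidableEq α] (l : List α) (x : α) (hnd : l.Nodup) :
    l.count x = if x ∈ l then 1 else 0 := by
  by_cases hm : x ∈ l
  · rw [if_pos hm]
    exact List.count_eq_one_of_mem hnd hm
  · rw [if_neg hm]
    exact List.count_eq_zero_of_not_mem hm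

lemma pvSum_count_eq_countP (g : Int → List String) (t2 : String)
    (hnd : ∀ h, (g h).Nodup) :
    ∀ (rights : List Int),
      ((rights.map (fun h => (((g h).count t2 : Nat) : Int))).sum)
        = ((rights.countP (fun h => decide (t2 ∈ g h)) : Nat) : Int) := by
  intro rights
  induction rights with
  | nil => simp
  | cons h t ih =>
    rw [List.map_cons, List.sum_cons, ih, List.countP_cons]
    rw [pvCount_if_mem _ _ (hnd h)]
    by_cases hm : t2 ∈ g h
    · simp only [if_pos hm, decide_eq_true_eq]
      push_cast [hm]
      ring
    · simp [hm]

lemma pvContrib_getD (idx : PySem.Dict Int (List String)) (rights : List Int) (t2 : String)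
    (hnd : ∀ h, (idx.getD h []).Nodup) :
    (pvContrib idx rights).getD t2 0
      = ((rights.countP (fun h => decide (t2 ∈ idx.getD h [])) : Nat) : Int) := by
  unfold pvContrib
  rw [pvContrib_getD_aux, PySem.Dict.getD_empty, pvSum_count_eq_countP _ _ hnd]
  ring

lemma pvContrib_contains_aux (idx : PySem.Dict Int (List String)) (t2 : String) :
    ∀ (rights : List Int) (c : PySem.Dict String Int),
      ((rights.foldl (fun c h => (idx.getD h []).foldl (fun c t2 => c.insert t2 (c.getD t2 0 + 1)) c) c).contains t2 = true
        ↔ c.contains t2 = true ∨ ∃ h ∈ rights, t2 ∈ idx.getD h []) := by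
  intro rights
  induction rights with
  | nil => intro c; simp
  | cons h t ih =>
    intro c
    rw [List.foldl_cons, ih]
    have hstep : ((idx.getD h []).foldl (fun c t2 => c.insert t2 (c.getD t2 0 + 1)) c).contains t2 = true
        ↔ c.contains t2 = true ∨ t2 ∈ idx.getD h [] := by
      rw [PySem.Dict.contains_iff_mem_keys, PySem.Dict.contains_iff_mem_keys,
        PySem.Dict.keys_foldl_insert]
      rw [show PySem.Set.update c.keys (idx.getD h []) = (idx.getD h []).foldl (fun s b => PySem.Set.add s (id b)) c.keys from rfl]
      rw [PySem.Set.mem_foldl_add]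
      simp
    rw [hstep]
    constructor
    · rintro (h1 | h2)
      · rcases h1 with h1 | h1
        · exact Or.inl h1
        · exact Or.inr ⟨h, by simp, h1⟩
      · obtain ⟨h', hh', ht'⟩ := h2
        exact Or.inr ⟨h', by simp [hh'], ht'⟩
    · rintro (h1 | ⟨h', hh', ht'⟩)
      · exact Or.inl (Or.inl h1)
      · rcases List.mem_cons.1 hh' with he | he
        · subst he
          exact Or.inl (Or.inr ht')
        · exact Or.inr ⟨h', he, ht'⟩

lemma pvContrib_contains (idx : PySem.Dict Int (List String)) (rights : List Int) (t2 : String) :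
    ((pvContrib idx rights).contains t2 = true ↔ ∃ h ∈ rights, t2 ∈ idx.getD h []) := by
  unfold pvContrib
  rw [pvContrib_contains_aux]
  simp

-- the merge of contrib equals the canonical inner fold
lemma pvMerge_eq_inner (uniq : List String) (hu : uniq.Nodup)
    (sent : PySem.Dict String (List Int)) (rights : List Int) (temp : PySem.Dict String Int) :
    pvMerge uniq (pvContrib (pvIdx uniq sent) rights) temp
      = uniq.foldl (fun temp t2 =>
          if sent.contains t2 = true then
            (if rights.countP (fun h => decide (h ∈ pvOdds (sent.getD t2 []))) = 0 then temp
             else temp.insert t2 (temp.getD t2 0 + (rights.countP (fun h => decide (h ∈ pvOdds (sent.getD t2 []))) : Int)))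
          else temp) temp := by
  unfold pvMerge
  apply PySem.List.foldl_congr_mem
  intro b t2 ht2
  cases hg : sent.get? t2 with
  | none =>
    have hcs : sent.contains t2 = false := by
      rw [PySem.Dict.contains_eq_isSome_get?, hg]; rfl
    have hcc : (pvContrib (pvIdx uniq sent) rights).contains t2 = false := by
      rw [Bool.eq_false_iff]
      intro hc
      obtain ⟨h, _, hm⟩ := (pvContrib_contains _ _ _).1 hc
      obtain ⟨_, w, hw, _⟩ := (pvIdx_mem uniq sent h t2).1 hm
      rw [hg] at hw
      simp at hw
    rw [hcc, hcs]
    simp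
  | some w =>
    have hcs : sent.contains t2 = true := by
      rw [PySem.Dict.contains_eq_isSome_get?, hg]; rfl
    have hgd : sent.getD t2 [] = w := PySem.Dict.getD_of_get?_eq_some sent [] hg
    have hpred : ∀ h, decide (t2 ∈ (pvIdx uniq sent).getD h []) = decide (h ∈ pvOdds w) := by
      intro h
      rw [decide_eq_decide, pvIdx_mem]
      constructor
      · rintro ⟨_, w', hw', hh⟩
        rw [hg] at hw'
        cases hw'
        exact hh
      · intro hh
        exact ⟨ht2, w, hg, hh⟩
    have hcnt : rights.countP (fun h => decide (t2 ∈ (pvIdx uniq sent).getD h []))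
        = rights.countP (fun h => decide (h ∈ pvOdds (sent.getD t2 []))) := by
      apply List.countP_congr
      intro h _
      rw [hpred h, hgd]
    have hcc : ((pvContrib (pvIdx uniq sent) rights).contains t2 = true)
        ↔ ¬ rights.countP (fun h => decide (h ∈ pvOdds (sent.getD t2 []))) = 0 := by
      rw [pvContrib_contains, ← hcnt]
      rw [show (¬ rights.countP (fun h => decide (t2 ∈ (pvIdx uniq sent).getD h [])) = 0)
            ↔ 0 < rights.countP (fun h => decide (t2 ∈ (pvIdx uniq sent).getD h [])) from by omega]
      rw [List.countP_pos_iff]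
      constructor
      · rintro ⟨h, hh, hm⟩; exact ⟨h, hh, by simpa using hm⟩
      · rintro ⟨h, hh, hm⟩; exact ⟨h, hh, by simpa using hm⟩
    by_cases h0 : rights.countP (fun h => decide (h ∈ pvOdds (sent.getD t2 []))) = 0
    · have hcf : (pvContrib (pvIdx uniq sent) rights).contains t2 = false := by
        rw [Bool.eq_false_iff]
        intro hc
        exact (hcc.1 hc) h0
      rw [hcf, hcs]
      simp [h0]
    · rw [hcc.2 h0, hcs, if_pos (rfl : (true : Bool) = true), if_pos (rfl : (true : Bool) = true), if_neg h0]
      congr 1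
      rw [pvContrib_getD _ _ _ (fun h => pvIdx_getD_nodup uniq sent h hu), hcnt]

-- loop interchange: a sentence-major pass over per-tag conditional updates of a pre-built table
-- equals independent per-tag folds (the heart of the B ↔ canonical-form equivalence)
lemma pvInner_commute (P : String → Prop) [DecidablePred P]
    (u1 : String → PySem.Dict String Int → PySem.Dict String Int) :
    ∀ (l ks : List String) (G : String → PySem.Dict String Int), l.Nodup → (∀ t ∈ l, t ∈ ks) →
      l.foldl (fun arc tag =>
          if P tag then arc else arc.insert tag (u1 tag (arc.getD tag PySem.Dict.empty))) (pvDmk G ks)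
        = pvDmk (fun t => if ¬ P t ∧ t ∈ l then u1 t (G t) else G t) ks := by
  intro l
  induction l with
  | nil =>
    intro ks G _ _
    simp only [List.foldl_nil]
    apply pvDmk_congr
    intro t _
    simp
  | cons x tl ih =>
    intro ks G hnd hsub
    rw [List.foldl_cons]
    by_cases hp : P x
    · rw [if_pos hp, ih ks G hnd.of_cons (fun t ht => hsub t (by simp [ht]))]
      apply pvDmk_congr
      intro t _
      by_cases htl : ¬ P t ∧ t ∈ tl
      · rw [if_pos htl, if_pos ⟨htl.1, by simp [htl.2]⟩]
      · rw [if_neg htl, if_neg (by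
          rintro ⟨hnp, hmem⟩
          rcases List.mem_cons.1 hmem with he | he
          · subst he; exact hnp hp
          · exact htl ⟨hnp, he⟩)]
    · rw [if_neg hp]
      have hx : x ∈ ks := hsub x (by simp)
      have hxd : x ∈ PySem.List.dedup ks := (PySem.List.mem_dedup _ _).2 hx
      rw [pvDmk_getD G ks hxd, pvDmk_insert G ks x hx]
      rw [ih ks _ hnd.of_cons (fun t ht => hsub t (by simp [ht]))]
      apply pvDmk_congr
      intro t _
      have hxtl : x ∉ tl := by simp_all
      by_cases hte : t = x
      · subst hte
        rw [if_neg (by rintro ⟨_, hmem⟩; exact hxtl hmem)]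
        rw [if_pos rfl]
        rw [if_pos (show ¬ P t ∧ t ∈ t :: tl from ⟨hp, by simp⟩)]
      · simp only [if_neg hte]
        by_cases htl : ¬ P t ∧ t ∈ tl
        · rw [if_pos htl, if_pos ⟨htl.1, by simp [htl.2]⟩]
        · rw [if_neg htl, if_neg (by
            rintro ⟨hnp, hmem⟩
            rcases List.mem_cons.1 hmem with he | he
            · exact hte he
            · exact htl ⟨hnp, he⟩)]

lemma pvOuter_commute (P : List (String × List Int) → String → Prop) [∀ s t, Decidable (P s t)]
    (u : List (String × List Int) → String → PySem.Dict String Int → PySem.Dict String Int)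
    (uniq : List String) (hu : uniq.Nodup) :
    ∀ (rels : List (List (String × List Int))) (F : String → PySem.Dict String Int),
      rels.foldl (fun arc s =>
          uniq.foldl (fun arc tag =>
            if P s tag then arc else arc.insert tag (u s tag (arc.getD tag PySem.Dict.empty))) arc)
        (pvDmk F uniq)
      = pvDmk (fun tag => rels.foldl (fun temp s => if P s tag then temp else u s tag temp) (F tag)) uniq := by
  intro rels
  induction rels with
  | nil =>
    intro F
    simp only [List.foldl_nil]
  | cons s rels ih =>
    intro F
    rw [List.foldl_cons]
    rw [pvInner_commute (P s) (u s) uniq uniq F hu (fun t ht => ht)]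
    rw [show pvDmk (fun t => if ¬ P s t ∧ t ∈ uniq then u s t (F t) else F t) uniq
        = pvDmk (fun t => if P s t then F t else u s t (F t)) uniq from by
      apply pvDmk_congr
      intro t htd
      have htm : t ∈ uniq := (PySem.List.mem_dedup _ _).1 htd
      by_cases hp : P s t
      · rw [if_neg (by rintro ⟨hnp, _⟩; exact hnp hp), if_pos hp]
      · rw [if_pos ⟨hp, htm⟩, if_neg hp]]
    rw [ih (fun t => if P s t then F t else u s t (F t))]
    apply pvDmk_congr
    intro t _
    rw [List.foldl_cons]

-- B reduced to the canonical form
lemma pvB_canonical (relations : List (List (String × List Int))) (unique_tags : List String) :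
    calculate_right_arc_alt relations unique_tags
      = (pvDmk (fun tag => relations.foldl
            (fun temp s => pvStepC (PySem.List.dedup unique_tags) (PySem.Dict.ofList s) tag temp)
            PySem.Dict.empty) (PySem.List.dedup unique_tags)).items.map (fun p => (p.1, p.2.items)) := by
  unfold calculate_right_arc_alt
  simp only []
  rw [pvFoldl_insert_keyfun' (fun _ => (PySem.Dict.empty : PySem.Dict String Int)) (PySem.List.dedup unique_tags)]
  congr 2
  have hu : (PySem.List.dedup unique_tags).Nodup := PySem.List.nodup_dedup _
  -- rewrite the per-sentence step from match form to conditional-insert form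
  rw [show (fun (arc : PySem.Dict String (PySem.Dict String Int)) s =>
        (PySem.List.dedup unique_tags).foldl (fun arc tag =>
          match (PySem.Dict.ofList s).get? tag with
          | none => arc
          | some vals =>
            if pvRights vals = [] then arc
            else arc.insert tag (pvMerge (PySem.List.dedup unique_tags)
              (pvContrib (pvIdx (PySem.List.dedup unique_tags) (PySem.Dict.ofList s)) (pvRights vals))
              (arc.getD tag PySem.Dict.empty))) arc)
      = (fun arc s =>
        (PySem.List.dedup unique_tags).foldl (fun arc tag =>
          if pvRightsOf (PySem.Dict.ofList s) tag = [] then arc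
          else arc.insert tag (pvMerge (PySem.List.dedup unique_tags)
            (pvContrib (pvIdx (PySem.List.dedup unique_tags) (PySem.Dict.ofList s))
              (pvRightsOf (PySem.Dict.ofList s) tag))
            (arc.getD tag PySem.Dict.empty))) arc) from by
    funext arc s
    apply PySem.List.foldl_congr_mem
    intro arc2 tag _
    cases hg : (PySem.Dict.ofList s).get? tag with
    | none => simp [pvRightsOf, hg]
    | some vals => simp only [pvRightsOf, hg]]
  rw [pvOuter_commute (fun s tag => pvRightsOf (PySem.Dict.ofList s) tag = [])
        (fun s tag temp => pvMerge (PySem.List.dedup unique_tags)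
          (pvContrib (pvIdx (PySem.List.dedup unique_tags) (PySem.Dict.ofList s))
            (pvRightsOf (PySem.Dict.ofList s) tag)) temp)
        (PySem.List.dedup unique_tags) hu relations (fun _ => PySem.Dict.empty)]
  apply pvDmk_congr
  intro tag _
  apply PySem.List.foldl_congr_mem
  intro temp s _
  unfold pvStepC
  by_cases hr : pvRightsOf (PySem.Dict.ofList s) tag = []
  · rw [if_pos hr, if_pos hr]
  · rw [if_neg hr, if_neg hr,
      pvMerge_eq_inner (PySem.List.dedup unique_tags) hu (PySem.Dict.ofList s)
        (pvRightsOf (PySem.Dict.ofList s) tag) temp]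

-- A reduced to the canonical form (under Pre_)
lemma pvA_canonical (relations : List (List (String × List Int))) (unique_tags : List String)
    (hpre : Pre_calculate_right_arc relations unique_tags) :
    calculate_right_arc relations unique_tags
      = (pvDmk (fun tag => relations.foldl
            (fun temp s => pvStepC (PySem.List.dedup unique_tags) (PySem.Dict.ofList s) tag temp)
            PySem.Dict.empty) unique_tags).items.map (fun p => (p.1, p.2.items)) := by
  unfold calculate_right_arc pvCommonArcs
  simp only []
  rw [pvFoldl_insert_keyfun' (fun tag => List.foldl (fun acc s => acc ++ [if (PySem.Dict.ofList s).contains tag = true then some (pvOdds ((PySem.Dict.ofList s).getD tag [])) else none]) [] relations) unique_tags]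
  rw [pvDmk_keys]
  rw [show List.foldl (fun acc s => acc ++ [pvRightTemp (PySem.Dict.ofList s)]) [] relations = List.map (fun s => pvRightTemp (PySem.Dict.ofList s)) relations from by simpa using PySem.List.foldl_append_singleton_eq_map (fun s => pvRightTemp (PySem.Dict.ofList s)) relations []]
  refine Eq.trans (congrArg (fun d : PySem.Dict String (PySem.Dict String Int) => List.map (fun p => (p.1, p.2.items)) d.items) (pvFoldl_insert_keyfun' _ unique_tags)) ?_
  refine congrArg (fun d : PySem.Dict String (PySem.Dict String Int) => List.map (fun p => (p.1, p.2.items)) d.items) ?_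
  apply pvDmk_congr
  intro tag _
  refine Eq.trans (pvFoldl_counter_fst _ _ _ _) ?_
  refine Eq.trans ?_ (pvFoldl_enum_snd _ relations 0 PySem.Dict.empty)
  rw [pvEnumerate_map (fun s => pvRightTemp (PySem.Dict.ofList s)) relations 0, List.foldl_map]
  apply PySem.List.foldl_congr_mem
  intro temp p hp
  obtain ⟨k, hk, h1, h2⟩ := pvMem_enumerate relations 0 p hp
  obtain ⟨c, s⟩ := p
  rw [zero_add] at h1
  subst h1
  subst h2
  have hs : relations[k] ∈ relations := List.getElem_mem hk
  have hev : ∀ v ∈ (PySem.Dict.ofList relations[k]).values, v.length % 2 = 0 := hpre relations[k] hs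
  have hnd : (PySem.Dict.ofList relations[k]).keys.Nodup := PySem.Dict.nodup_keys_ofList relations[k]
  rw [pvRightTemp_contains _ hnd hev tag, pvRightTemp_getD _ hnd hev tag]
  unfold pvStepC
  by_cases hr : pvRightsOf (PySem.Dict.ofList relations[k]) tag = []
  · simp [hr]
  · rw [if_neg hr, if_pos (by simpa [List.isEmpty_iff] using hr)]
    apply PySem.List.foldl_congr_mem
    intro temp2 t2 ht2
    rw [pvDmk_getD _ unique_tags ht2 []]
    rw [show List.foldl (fun acc s => acc ++ [if (PySem.Dict.ofList s).contains t2 = true then some (pvOdds ((PySem.Dict.ofList s).getD t2 [])) else none]) [] relations = List.map (fun s => if (PySem.Dict.ofList s).contains t2 = true then some (pvOdds ((PySem.Dict.ofList s).getD t2 [])) else none) relations from by simpa using PySem.List.foldl_append_singleton_eq_map (fun s => if (PySem.Dict.ofList s).contains t2 = true then some (pvOdds ((PySem.Dict.ofList s).getD t2 [])) else none) relations []]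
    rw [PySem.List.pyGetD_eq_getElem (List.map (fun s => if (PySem.Dict.ofList s).contains t2 = true then some (pvOdds ((PySem.Dict.ofList s).getD t2 [])) else none) relations) none (by positivity) (by simpa using hk)]
    simp only [Int.toNat_natCast, List.getElem_map]
    by_cases hc : (PySem.Dict.ofList relations[k]).contains t2 = true
    · rw [if_pos hc, if_pos hc]
      rw [PySem.List.foldl_pyRange_zero_pyGetD' (pvRightsOf (PySem.Dict.ofList relations[k]) tag) 0
            (fun temp_dict r => if pvMatches (some (pvOdds ((PySem.Dict.ofList relations[k]).getD t2 []))) r = true then (if temp_dict.contains t2 = true then temp_dict.insert t2 (temp_dict.getD t2 0 + 1) else temp_dict.insert t2 1) else temp_dict) temp2]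
      rw [pvCount_fold (pvOdds ((PySem.Dict.ofList relations[k]).getD t2 [])) t2 (pvRightsOf (PySem.Dict.ofList relations[k]) tag) temp2]
      have hpred : (fun r => (pvOdds ((PySem.Dict.ofList relations[k]).getD t2 [])).contains r)
          = (fun h => decide (h ∈ pvOdds ((PySem.Dict.ofList relations[k]).getD t2 []))) := by
        funext r
        rw [Bool.eq_iff_iff]
        simp [List.contains_iff_mem]
      rw [hpred]
    · rw [if_neg hc, if_neg hc]
      simp only [pvMatches, Bool.false_eq_true, if_false]
      exact pvFoldl_id _ temp2

-- ===== VERDICT (by name: the statement is the Claim_ definition above) =====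
theorem calculate_right_arc_spec : Claim_equal_calculate_right_arc := by
  intro relations unique_tags _ hpre
  unfold Spec_calculate_right_arc
  rw [pvA_canonical relations unique_tags hpre, pvB_canonical relations unique_tags]
  exact pvDmk_map_items_eq unique_tags (fun _ => rfl)
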